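-- pv_equiv track=rewrite | github.com/DevOpsOfChaos/media-manager | src/media_manager/core/gui_qt_render_tree.py | _safe_id
-- ===== SOURCE A (Python) =====
-- def _text(value: object, fallback: str = "") -> str:
--     text = str(value).strip() if value is not None else ""
--     return text or fallback
--
-- def _safe_id(value: object, fallback: str = "node") -> str:
--     text = _text(value, fallback).lower().replace("_", "-").replace(" ", "-")
--     allowed = []
--     previous_dash = False
--     for char in text:
--         if char.isalnum():
--             allowed.append(char)
--             previous_dash = False
--         elif not previous_dash:
--             allowed.append("-")
--             previous_dash = True
--     normalized = "".join(allowed).strip("-")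
--     return normalized or fallback
-- ===== SOURCE B (Python) =====
-- def _text(value, fallback=""):
--     text = str(value).strip() if value is not None else ""
--     return text or fallback
--
-- def _safe_id(value, fallback="node"):
--     text = _text(value, fallback).lower()
--     words = []
--     i, n = 0, len(text)
--     while i < n:
--         if text[i].isalnum():
--             j = i + 1
--             while j < n and text[j].isalnum():
--                 j += 1
--             words.append(text[i:j])
--             i = j
--         else:
--             i += 1
--     normalized = "-".join(words)
--     return normalized or fallback
-- ===== Notes on version B (the rewrite author's own statement) =====
-- stated objective: alternative
-- what changed: B replaces A's stateful previous_dash flag loop (plus the underscore/space replace calls and the trailing strip pass) by a two-pointer scan that extracts the maximal alphanumeric runs of the lowercased text and joins them with a dash, which collapses and strips separator dashes by construction.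
import Mathlib
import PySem

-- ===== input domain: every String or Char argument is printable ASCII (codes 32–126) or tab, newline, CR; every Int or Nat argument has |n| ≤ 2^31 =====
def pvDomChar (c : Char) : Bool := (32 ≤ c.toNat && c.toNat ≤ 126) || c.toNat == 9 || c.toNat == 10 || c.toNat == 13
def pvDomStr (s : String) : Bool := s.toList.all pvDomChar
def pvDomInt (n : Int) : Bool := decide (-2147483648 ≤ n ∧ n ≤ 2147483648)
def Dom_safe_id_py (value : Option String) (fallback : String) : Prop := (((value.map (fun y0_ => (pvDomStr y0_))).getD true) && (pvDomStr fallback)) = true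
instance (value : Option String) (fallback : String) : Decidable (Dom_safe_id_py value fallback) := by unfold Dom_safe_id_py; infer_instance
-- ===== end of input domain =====

-- B replaces A's flag-based dash-emitting scan plus replace/strip('-') post-passes by a
-- two-pointer scan that collects the maximal alphanumeric runs and joins them with '-'
-- (objective: alternative).

-- ===== PORT A =====
-- shared helper: Python _text(value, fallback) (identical helper in both Source A and Source B), as a char list
def pyText (value : Option String) (fallback : String) : List Char :=
  let text : List Char := match value with
    | some v => PySem.Chars.strip v.toList
    | none => []
  if text = [] then fallback.toList else text

-- the body of A's for-loop: state (allowed, previous_dash)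
def safeIdStepA (acc : List Char × Bool) (c : Char) : List Char × Bool :=
  if PySem.Chars.isalnum c then (acc.1 ++ [c], false)
  else if acc.2 = false then (acc.1 ++ ['-'], true)
  else acc

def safe_id_py (value : Option String) (fallback : String) : String :=
  let text := PySem.Chars.replace
      (PySem.Chars.replace (PySem.Chars.lower (pyText value fallback)) ['_'] ['-']) [' '] ['-']
  let res := text.foldl safeIdStepA ([], false)
  let normalized := PySem.Chars.stripChars res.1 ['-']
  if normalized = [] then fallback else String.ofList normalized

-- ===== PORT B =====
-- B's outer while-loop over the remaining text; the inner `while j` scan of an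
-- alphanumeric run (and the text[i:j] slice) is the takeWhile/dropWhile split of the remainder
def wordsB (s : List Char) : List (List Char) :=
  match s with
  | [] => []
  | c :: r =>
    if PySem.Chars.isalnum c then
      (c :: r.takeWhile PySem.Chars.isalnum) :: wordsB (r.dropWhile PySem.Chars.isalnum)
    else wordsB r
termination_by s.length
decreasing_by
  · simp only [List.length_cons]
    exact Nat.lt_succ_of_le (List.length_dropWhile_le _ _)
  · simp

def safe_id_py_alt (value : Option String) (fallback : String) : String :=
  let text := PySem.Chars.lower (pyText value fallback)
  let normalized := PySem.Chars.join ['-'] (wordsB text)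
  if normalized = [] then fallback else String.ofList normalized

-- ===== PRECONDITION & SPEC =====
def Spec_safe_id_py (value : Option String) (fallback : String) (out : String) : Prop := out = safe_id_py_alt value fallback
instance (value : Option String) (fallback : String) (out : String) : Decidable (Spec_safe_id_py value fallback out) := by unfold Spec_safe_id_py; infer_instance

-- ===== CLAIM (what is proved, stated in full; the proofs are below) =====
def Claim_equal_safe_id_py : Prop := ∀ (value : Option String) (fallback : String), Dom_safe_id_py value fallback → Spec_safe_id_py value fallback (safe_id_py value fallback)

-- ===== LEMMAS AND PROOFS =====

-- `dashP c` = Python `c in "-"` as used by strip('-')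
def dashP (c : Char) : Bool := decide (c = '-')

-- strip('-') from the right only
def rstripD (x : List Char) : List Char := (List.dropWhile dashP x.reverse).reverse

-- map every non-alphanumeric char to '-'
def hDash (c : Char) : Char := if PySem.Chars.isalnum c then c else '-'

-- A's scan, restated on the dash-mapped text: emit non-dashes; emit '-' only if the
-- previously seen char was not already a dash (flag p)
def collapse : List Char → Bool → List Char
  | [], _ => []
  | c :: r, p =>
    if c = '-' then (if p then collapse r true else '-' :: collapse r true)
    else c :: collapse r false

-- maximal non-dash runs of a dash-mapped text
def runsD (s : List Char) : List (List Char) :=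
  match s with
  | [] => []
  | c :: r =>
    if c = '-' then runsD r
    else (c :: r.takeWhile (fun a => !(a == '-'))) :: runsD (r.dropWhile (fun a => !(a == '-')))
termination_by s.length
decreasing_by
  · simp
  · simp only [List.length_cons]
    exact Nat.lt_succ_of_le (List.length_dropWhile_le _ _)

theorem isalnum_dash : PySem.Chars.isalnum '-' = false := by decide

theorem isalnum_ne_dash {c : Char} (h : PySem.Chars.isalnum c = true) : c ≠ '-' := by
  intro hc; subst hc; rw [isalnum_dash] at h; exact Bool.false_ne_true h

-- A's foldl produces `collapse` of the dash-mapped text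
theorem foldl_stepA (s : List Char) : ∀ (acc : List Char) (p : Bool),
    (s.foldl safeIdStepA (acc, p)).1 = acc ++ collapse (s.map hDash) p := by
  induction s with
  | nil => intro acc p; simp [collapse]
  | cons c r ih =>
    intro acc p
    by_cases hc : PySem.Chars.isalnum c = true
    · have hstep : safeIdStepA (acc, p) c = (acc ++ [c], false) := by simp [safeIdStepA, hc]
      have hmap : hDash c = c := by simp [hDash, hc]
      rw [List.foldl_cons, hstep, ih, List.map_cons, hmap]
      simp [collapse, isalnum_ne_dash hc]
    · have hc' : PySem.Chars.isalnum c = false := by simpa using hc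
      have hmap : hDash c = '-' := by simp [hDash, hc']
      cases p with
      | false =>
        have hstep : safeIdStepA (acc, false) c = (acc ++ ['-'], true) := by
          simp [safeIdStepA, hc']
        rw [List.foldl_cons, hstep, ih, List.map_cons, hmap]
        simp [collapse]
      | true =>
        have hstep : safeIdStepA (acc, true) c = (acc, true) := by
          simp [safeIdStepA, hc']
        rw [List.foldl_cons, hstep, ih, List.map_cons, hmap]
        simp [collapse]

-- Python str.replace with one-char old/new is a map (characterising PySem.Chars.replace.go)
theorem replace_go_single (o n : Char) :
    ∀ (s : List Char) (fuel : Nat) (acc : List Char), s.length ≤ fuel →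
      PySem.Chars.replace.go [o] [n] fuel s acc
        = acc.reverse ++ s.map (fun c => if o == c then n else c) := by
  intro s
  induction s with
  | nil =>
    intro fuel acc _
    cases fuel <;> simp [PySem.Chars.replace.go]
  | cons c t ih =>
    intro fuel acc hle
    cases fuel with
    | zero => simp at hle
    | succ f =>
      have ht : t.length ≤ f := by simpa using hle
      by_cases ho : (o == c) = true
      · have hpre : List.isPrefixOf [o] (c :: t) = true := by
          simp [List.isPrefixOf, ho]
        have hgo : PySem.Chars.replace.go [o] [n] (f + 1) (c :: t) acc
            = PySem.Chars.replace.go [o] [n] f t ([n].reverse ++ acc) := by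
          simp only [PySem.Chars.replace.go, hpre, if_pos]
          rw [show List.drop [o].length (c :: t) = t by simp]
        rw [hgo, ih f ([n].reverse ++ acc) ht]
        simp [ho]
        exact fun h => absurd (by simpa using ho) h
      · have ho' : (o == c) = false := by simpa using ho
        have hpre : List.isPrefixOf [o] (c :: t) = false := by
          simp [List.isPrefixOf, ho']
        have hgo : PySem.Chars.replace.go [o] [n] (f + 1) (c :: t) acc
            = PySem.Chars.replace.go [o] [n] f t (c :: acc) := by
          simp only [PySem.Chars.replace.go, hpre, Bool.false_eq_true, if_neg
            (by exact fun h => h.elim : ¬False)]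
        rw [hgo, ih f (c :: acc) ht]
        simp [ho']
        exact fun h => absurd h (by simpa using ho)

theorem replace_single (s : List Char) (o n : Char) :
    PySem.Chars.replace s [o] [n] = s.map (fun c => if o == c then n else c) := by
  have h := replace_go_single o n s s.length [] (le_refl _)
  simpa [PySem.Chars.replace] using h

-- the two replaces of A do not change the dash-mapped text
theorem map_hDash_replace (s : List Char) (o : Char)
    (ho : PySem.Chars.isalnum o = false) :
    (PySem.Chars.replace s [o] ['-']).map hDash = s.map hDash := by
  rw [replace_single, List.map_map]
  apply List.map_congr_left
  intro a _
  simp only [Function.comp_apply]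
  by_cases h : o = a
  · subst h
    rw [if_pos (by simp)]
    show hDash '-' = hDash o
    unfold hDash
    rw [isalnum_dash, ho]
    simp
  · rw [if_neg (by simpa using h)]

theorem dropWhile_nodash (x : List Char) (hx : ∀ a ∈ x, dashP a = false) :
    List.dropWhile dashP x = x := by
  cases x with
  | nil => simp
  | cons a y =>
    rw [List.dropWhile_cons, if_neg]
    simp [hx a (by simp)]

theorem rstripD_nodash (x : List Char) (hx : ∀ a ∈ x, dashP a = false) : rstripD x = x := by
  unfold rstripD
  rw [dropWhile_nodash _ (by intro a ha; exact hx a (by simpa using ha)), List.reverse_reverse]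

-- collapse with the flag set never starts with a dash
theorem dropWhile_collapse_true (r : List Char) :
    List.dropWhile dashP (collapse r true) = collapse r true := by
  induction r with
  | nil => simp [collapse]
  | cons c r ih =>
    by_cases hc : c = '-'
    · subst hc; simpa [collapse] using ih
    · simp [collapse, hc, dashP]

-- stripping leading dashes of A's result = running the scan with the flag set
theorem dropWhile_collapse_false (r : List Char) :
    List.dropWhile dashP (collapse r false) = collapse r true := by
  cases r with
  | nil => simp [collapse]
  | cons c r =>
    by_cases hc : c = '-'
    · subst hc
      have h1 : collapse ('-' :: r) false = '-' :: collapse r true := by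
        simp [collapse]
      rw [h1, List.dropWhile_cons, if_pos (by simp [dashP])]
      exact dropWhile_collapse_true r
    · simp [collapse, hc, dashP]

theorem rstripD_append (u v : List Char) :
    rstripD (u ++ v) = if rstripD v = [] then rstripD u else u ++ rstripD v := by
  unfold rstripD
  rw [List.reverse_append, List.dropWhile_append]
  by_cases h : (List.dropWhile dashP v.reverse).isEmpty = true
  · have hv : (List.dropWhile dashP v.reverse).reverse = [] := by
      rw [List.isEmpty_iff] at h; simp [h]
    simp [h, hv]
  · have h' : (List.dropWhile dashP v.reverse).isEmpty = false := by simpa using h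
    have hv : ¬((List.dropWhile dashP v.reverse).reverse = []) := by
      rw [List.isEmpty_eq_false_iff] at h'; simp [h']
    simp [h', hv]

theorem rstripD_cons (a : Char) (x : List Char) :
    rstripD (a :: x)
      = if rstripD x = [] then (if dashP a then [] else [a]) else a :: rstripD x := by
  have h := rstripD_append [a] x
  simp only [List.singleton_append] at h
  rw [h]
  by_cases hx : rstripD x = []
  · simp only [hx, if_pos rfl]
    by_cases ha : dashP a = true <;> simp [rstripD, List.dropWhile_cons, ha]
  · simp [hx]

-- the scan splits at the first dash run
theorem collapse_false_split (r : List Char) :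
    collapse r false
      = r.takeWhile (fun a => !(a == '-')) ++ collapse (r.dropWhile (fun a => !(a == '-'))) false := by
  induction r with
  | nil => simp [collapse]
  | cons c r ih =>
    by_cases hc : c = '-'
    · subst hc
      simp [List.takeWhile_cons]
    · simp only [List.takeWhile_cons, List.dropWhile_cons]
      rw [show ((!(c == '-')) = true) from by simp [hc]]
      simp only [if_pos trivial, collapse, if_neg hc, List.cons_append]
      exact congrArg (c :: ·) ih

theorem runsD_ne_nil (m : List Char) : ∀ w ∈ runsD m, w ≠ [] := by
  induction m using runsD.induct with
  | case1 => simp [runsD]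
  | case2 r ih => simp only [runsD]; exact ih
  | case3 c r hc ih =>
    simp only [runsD, if_neg hc]
    intro w hw
    rcases List.mem_cons.1 hw with h | h
    · subst h; simp
    · exact ih w h

theorem intercalate_one (sep x : List Char) : List.intercalate sep [x] = x := by
  simp [List.intercalate]

theorem intercalate_cons_cons (sep x y : List Char) (ys : List (List Char)) :
    List.intercalate sep (x :: y :: ys) = x ++ sep ++ List.intercalate sep (y :: ys) := by
  simp [List.intercalate, List.intersperse]

theorem intercalate_cons_ne_nil (sep w : List Char) (ws : List (List Char)) (hw : w ≠ []) :
    List.intercalate sep (w :: ws) ≠ [] := by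
  cases ws with
  | nil => rw [intercalate_one]; exact hw
  | cons w' ws' =>
    rw [intercalate_cons_cons]
    intro h
    rcases List.append_eq_nil_iff.1 h with ⟨h1, _⟩
    rcases List.append_eq_nil_iff.1 h1 with ⟨h2, _⟩
    exact hw h2

-- the core identity: A's stripped scan = '-'-join of the maximal non-dash runs
theorem collapse_true_runs (m : List Char) :
    rstripD (collapse m true) = List.intercalate ['-'] (runsD m) := by
  induction m using runsD.induct with
  | case1 => simp [collapse, runsD, rstripD, List.intercalate]
  | case2 r ih =>
    rw [show collapse ('-' :: r) true = collapse r true from by simp [collapse],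
        show runsD ('-' :: r) = runsD r from by simp [runsD]]
    exact ih
  | case3 c r hc ih =>
    have htake : ∀ a ∈ c :: r.takeWhile (fun a => !(a == '-')), dashP a = false := by
      intro a ha
      rcases List.mem_cons.1 ha with h | h
      · subst h; simp [dashP, hc]
      · have := List.mem_takeWhile_imp h
        simp [dashP]; intro hEq; subst hEq; simp at this
    rw [show collapse (c :: r) true = c :: collapse r false from by simp [collapse, hc],
        show runsD (c :: r)
            = (c :: r.takeWhile (fun a => !(a == '-')))
              :: runsD (r.dropWhile (fun a => !(a == '-'))) from by simp [runsD, hc],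
        collapse_false_split r]
    cases hdrop : r.dropWhile (fun a => !(a == '-')) with
    | nil =>
      rw [show collapse ([] : List Char) false = [] from rfl, List.append_nil,
          rstripD_nodash _ htake, show runsD ([] : List Char) = [] from by simp [runsD], intercalate_one]
    | cons d s =>
      have hd : d = '-' := by
        have hne : r.dropWhile (fun a => !(a == '-')) ≠ [] := by rw [hdrop]; simp
        have := List.head_dropWhile_not (p := fun a => !(a == '-')) hne
        simp only [hdrop, List.head_cons] at this
        simpa using this
      subst hd
      rw [hdrop] at ih
      rw [show collapse ('-' :: s) true = collapse s true from by simp [collapse],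
          show runsD ('-' :: s) = runsD s from by simp [runsD]] at ih
      rw [show collapse ('-' :: s) false = '-' :: collapse s true from by simp [collapse],
          show runsD ('-' :: s) = runsD s from by simp [runsD],
          show c :: (r.takeWhile (fun a => !(a == '-')) ++ '-' :: collapse s true)
            = (c :: r.takeWhile (fun a => !(a == '-'))) ++ ('-' :: collapse s true) from by simp,
          rstripD_append, rstripD_cons, ih]
      cases hrs : runsD s with
      | nil =>
        rw [show List.intercalate ['-'] ([] : List (List Char)) = [] from by simp [List.intercalate]]
        rw [rstripD_nodash _ htake, intercalate_one]
        simp [dashP]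
      | cons w ws =>
        have hwne : w ≠ [] := runsD_ne_nil s w (by rw [hrs]; simp)
        have hne : List.intercalate ['-'] (w :: ws) ≠ [] := intercalate_cons_ne_nil _ _ _ hwne
        rw [if_neg hne,
            if_neg (show ¬('-' :: List.intercalate ['-'] (w :: ws) = []) from by simp),
            intercalate_cons_cons]
        simp

-- runs of the dash-mapped text are exactly B's alphanumeric runs
theorem nd_hDash (a : Char) : (!(hDash a == '-')) = PySem.Chars.isalnum a := by
  by_cases h : PySem.Chars.isalnum a = true
  · simp [hDash, h, isalnum_ne_dash h]
  · have h' : PySem.Chars.isalnum a = false := by simpa using h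
    simp [hDash, h']

theorem runsD_map_hDash (s : List Char) : runsD (s.map hDash) = wordsB s := by
  induction s using wordsB.induct with
  | case1 => simp [runsD, wordsB]
  | case2 c r hc ih =>
    have hfun : ((fun a => !(a == '-')) ∘ hDash) = PySem.Chars.isalnum := by
      funext a; exact nd_hDash a
    have htake : (r.map hDash).takeWhile (fun a => !(a == '-'))
        = r.takeWhile PySem.Chars.isalnum := by
      rw [List.takeWhile_map, hfun]
      have hid : ∀ a ∈ r.takeWhile PySem.Chars.isalnum, hDash a = a := by
        intro a ha
        simp [hDash, List.mem_takeWhile_imp ha]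
      rw [List.map_congr_left hid]
      simp
    have hdrop : (r.map hDash).dropWhile (fun a => !(a == '-'))
        = (r.dropWhile PySem.Chars.isalnum).map hDash := by
      rw [List.dropWhile_map, hfun]
    have hmapc : hDash c = c := by simp [hDash, hc]
    simp only [List.map_cons, hmapc, runsD, if_neg (isalnum_ne_dash hc), htake, hdrop,
      wordsB, hc, if_pos]
    rw [ih]
  | case3 c r hc ih =>
    have hc' : PySem.Chars.isalnum c = false := by simpa using hc
    have hmapc : hDash c = '-' := by simp [hDash, hc']
    simp only [List.map_cons, hmapc, runsD, if_pos rfl, wordsB, hc', Bool.false_eq_true,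
      if_neg (by simp : ¬False)]
    exact ih

-- Python .strip('-') through dashP/rstripD
theorem contains_dash (c : Char) : (['-'].contains c) = dashP c := by simp [dashP]

theorem stripChars_dash (x : List Char) :
    PySem.Chars.stripChars x ['-'] = rstripD (List.dropWhile dashP x) := by
  unfold PySem.Chars.stripChars rstripD
  rw [show (fun c => List.contains ['-'] c) = dashP from funext contains_dash]

-- ===== VERDICT (by name: the statement is the Claim_ definition above) =====
theorem safe_id_py_spec : Claim_equal_safe_id_py := by
  intro value fallback _
  unfold Spec_safe_id_py safe_id_py safe_id_py_alt
  have hnorm :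
      PySem.Chars.stripChars
        ((List.foldl safeIdStepA ([], false)
          (PySem.Chars.replace
            (PySem.Chars.replace (PySem.Chars.lower (pyText value fallback)) ['_'] ['-'])
            [' '] ['-'])).1) ['-']
      = PySem.Chars.join ['-'] (wordsB (PySem.Chars.lower (pyText value fallback))) := by
    rw [foldl_stepA _ [] false, List.nil_append]
    rw [map_hDash_replace _ ' ' (by decide), map_hDash_replace _ '_' (by decide)]
    rw [stripChars_dash, dropWhile_collapse_false, collapse_true_runs, runsD_map_hDash]
    rfl
  exact congrArg (fun L : List Char => if L = [] then fallback else String.ofList L) hnorm
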